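-- pv_equiv track=rewrite | github.com/dthoreson/CS469_PE08_DanielleThoreson | treasure_hunter.py | hunt_treasure
-- ===== SOURCE A (Python) =====
-- def hunt_treasure(arr, n, k):
--     """Return the maximum number of treasures that can be captured. (int)
--
--     Params:
--     arr : list[str] --> The map of length n with elements 'H' Hunter or 'T' Treasure
--     n : int --> The length of the map array
--     k : int --> Maximum allowed distance between a Hunter and a Treasure
--
--
--     """
--     #TODO: function logic
--     # Step 1: Create two lists to store the positions (indexes) of hunters and treasures
--     hunters = []
--     treasures = []
--
--     #Gather positions of hunters and treasures
--     for idx, val in enumerate(arr):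
--         if val == 'H':
--             hunters.append(idx)
--         elif val == 'T':
--             treasures.append(idx)
--
--     # Step 3: Use two pointers (i for hunters, j for treasures)
--     # These let us "walk" through both lists and try to make matches
--     i, j = 0, 0
--     matches = 0 # This will count successful hunter-treasure pairs
--     H, T = len(hunters), len(treasures)
--
--     # Two-pointer greedy approach
--     # Step 4: Greedy matching
--     # Keep going as long as we have hunters and treasures left to check
--     while i < H and j < T:
--         if abs(hunters[i] - treasures[j]) <= k:
--             #Pair this Hunter and Treasure
--             # If the hunter and treasure are close enough, we match them!
--             matches += 1
--             # Move to the next hunter and the next treasure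
--             i += 1
--             j += 1
--         elif hunters[i] < treasures[j]:
--             # If the hunter is too far to the left, move on to the next hunter
--             i += 1
--         else:
--             # If the treasure is too far to the left, move on to the next treasure
--             j += 1
--
--     # Step 5: Return the total matches we found
--     return matches
-- ===== SOURCE B (Python) =====
-- def hunt_treasure(arr, n, k):
--     """Single online left-to-right pass: maintain FIFO queues of unmatched
--     hunter and treasure positions; match each new element greedily against
--     the earliest still-reachable opposite element."""
--     hq = []  # unmatched hunter positions
--     tq = []  # unmatched treasure positions
--     matches = 0
--     for idx, val in enumerate(arr):
--         if val == 'H':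
--             while tq and idx - tq[0] > k:
--                 tq.pop(0)  # this treasure can never be matched any more
--             if tq:
--                 tq.pop(0)
--                 matches += 1
--             else:
--                 hq.append(idx)
--         elif val == 'T':
--             while hq and idx - hq[0] > k:
--                 hq.pop(0)
--             if hq:
--                 hq.pop(0)
--                 matches += 1
--             else:
--                 tq.append(idx)
--     return matches
-- ===== Notes on version B (the rewrite author's own statement) =====
-- stated objective: alternative
-- what changed: Replaces A's two-phase collect-positions-then-two-pointer greedy by a single online left-to-right pass that maintains two FIFO queues of unmatched hunter/treasure positions, matching each new element against the earliest still-reachable opposite element.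
import Mathlib
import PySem

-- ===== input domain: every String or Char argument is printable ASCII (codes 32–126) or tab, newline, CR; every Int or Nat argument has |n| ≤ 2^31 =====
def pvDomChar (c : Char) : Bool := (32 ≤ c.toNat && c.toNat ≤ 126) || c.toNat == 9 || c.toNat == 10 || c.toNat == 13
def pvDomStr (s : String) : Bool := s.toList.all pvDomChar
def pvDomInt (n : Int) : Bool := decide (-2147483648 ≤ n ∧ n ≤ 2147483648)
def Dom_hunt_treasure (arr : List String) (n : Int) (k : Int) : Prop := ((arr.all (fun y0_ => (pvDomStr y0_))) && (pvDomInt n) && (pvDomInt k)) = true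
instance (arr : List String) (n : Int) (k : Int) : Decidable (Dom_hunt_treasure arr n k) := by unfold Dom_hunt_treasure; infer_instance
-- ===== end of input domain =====

-- B is a single online pass with two FIFO queues instead of A's collect-then-two-pointer greedy; same O(n) cost, equal count proved below.

-- ===== PORT A =====
-- A's first loop: for idx, val in enumerate(arr): append idx to hunters/treasures
def gatherA : List String → Int → List Int × List Int → List Int × List Int
  | [], _, acc => acc
  | v :: rest, idx, (hs, ts) =>
    if v = "H" then gatherA rest (idx + 1) (hs ++ [idx], ts)
    else if v = "T" then gatherA rest (idx + 1) (hs, ts ++ [idx])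
    else gatherA rest (idx + 1) (hs, ts)

-- A's while loop: pointers i, j over hunters/treasures, represented by the remaining suffixes
def loopA (k : Int) : List Int → List Int → Int → Int
  | h :: hs, t :: ts, m =>
    if |h - t| ≤ k then loopA k hs ts (m + 1)
    else if h < t then loopA k hs (t :: ts) m
    else loopA k (h :: hs) ts m
  | _, _, m => m
termination_by hs ts _ => hs.length + ts.length
decreasing_by all_goals (simp <;> omega)

def hunt_treasure (arr : List String) (n : Int) (k : Int) : Int :=
  let p := gatherA arr 0 ([], [])
  loopA k p.1 p.2 0

-- ===== PORT B =====
-- B's single loop: for idx, val in enumerate(arr), maintaining queues hq, tq and matches m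
def loopB (k : Int) : List String → Int → List Int → List Int → Int → Int
  | [], _, _, _, m => m
  | v :: rest, idx, hq, tq, m =>
    if v = "H" then
      match tq.dropWhile (fun t => idx - t > k) with   -- while tq and idx - tq[0] > k: tq.pop(0)
      | _ :: ts => loopB k rest (idx + 1) hq ts (m + 1)
      | [] => loopB k rest (idx + 1) (hq ++ [idx]) [] m
    else if v = "T" then
      match hq.dropWhile (fun h => idx - h > k) with
      | _ :: hs => loopB k rest (idx + 1) hs tq (m + 1)
      | [] => loopB k rest (idx + 1) [] (tq ++ [idx]) m
    else loopB k rest (idx + 1) hq tq m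

def hunt_treasure_alt (arr : List String) (n : Int) (k : Int) : Int :=
  loopB k arr 0 [] [] 0

-- ===== PRECONDITION & SPEC =====
def Spec_hunt_treasure (arr : List String) (n : Int) (k : Int) (out : Int) : Prop := out = hunt_treasure_alt arr n k
instance (arr : List String) (n : Int) (k : Int) (out : Int) : Decidable (Spec_hunt_treasure arr n k out) := by unfold Spec_hunt_treasure; infer_instance

-- ===== CLAIM (what is proved, stated in full; the proofs are below) =====
def Claim_equal_hunt_treasure : Prop := ∀ (arr : List String) (n : Int) (k : Int), Dom_hunt_treasure arr n k → Spec_hunt_treasure arr n k (hunt_treasure arr n k)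

-- ===== LEMMAS AND PROOFS =====

-- hunter indices of the remaining stream, counting from idx
def gH : List String → Int → List Int
  | [], _ => []
  | v :: rest, idx =>
    if v = "H" then idx :: gH rest (idx + 1)
    else if v = "T" then gH rest (idx + 1)
    else gH rest (idx + 1)

def gT : List String → Int → List Int
  | [], _ => []
  | v :: rest, idx =>
    if v = "H" then gT rest (idx + 1)
    else if v = "T" then idx :: gT rest (idx + 1)
    else gT rest (idx + 1)

lemma gatherA_eq : ∀ (l : List String) (idx : Int) (hs ts : List Int),
    gatherA l idx (hs, ts) = (hs ++ gH l idx, ts ++ gT l idx) := by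
  intro l
  induction l with
  | nil => intro idx hs ts; simp [gatherA, gH, gT]
  | cons v rest ih =>
    intro idx hs ts
    by_cases h1 : v = "H"
    · simp [gatherA, gH, gT, h1, ih]
    · by_cases h2 : v = "T"
      · simp [gatherA, gH, gT, h1, h2, ih]
      · simp [gatherA, gH, gT, h1, h2, ih]

lemma purgeT (k idx : Int) (Hs : List Int) :
    ∀ (ds Ts : List Int) (m : Int), (∀ d ∈ ds, d < idx ∧ idx - d > k) →
      loopA k (idx :: Hs) (ds ++ Ts) m = loopA k (idx :: Hs) Ts m := by
  intro ds
  induction ds with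
  | nil => intro Ts m _; simp
  | cons d ds ih =>
    intro Ts m hmem
    have hd := hmem d (by simp)
    have h1 : ¬ |idx - d| ≤ k := by rw [abs_of_pos (by omega)]; omega
    have h2 : ¬ idx < d := by omega
    simp only [List.cons_append, loopA, if_neg h1, if_neg h2]
    exact ih Ts m (fun x hx => hmem x (by simp [hx]))

lemma purgeH (k idx : Int) (Ts : List Int) :
    ∀ (ds Hs : List Int) (m : Int), (∀ d ∈ ds, d < idx ∧ idx - d > k) →
      loopA k (ds ++ Hs) (idx :: Ts) m = loopA k Hs (idx :: Ts) m := by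
  intro ds
  induction ds with
  | nil => intro Hs m _; simp
  | cons d ds ih =>
    intro Hs m hmem
    have hd := hmem d (by simp)
    have h1 : ¬ |d - idx| ≤ k := by rw [abs_of_neg (by omega)]; omega
    have h2 : d < idx := hd.1
    simp only [List.cons_append, loopA, if_neg h1, if_pos h2]
    exact ih Hs m (fun x hx => hmem x (by simp [hx]))

lemma dropWhile_head_not {p : Int → Bool} : ∀ (l : List Int) {x : Int} {xs : List Int},
    l.dropWhile p = x :: xs → p x = false := by
  intro l
  induction l with
  | nil => intro x xs h; simp [List.dropWhile] at h
  | cons a l ih =>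
    intro x xs h
    by_cases hp : p a
    · rw [List.dropWhile_cons_of_pos hp] at h; exact ih h
    · rw [List.dropWhile_cons_of_neg hp] at h; cases h; simpa using hp

lemma mem_dropWhile_of_mem {p : Int → Bool} {l : List Int} {x : Int}
    (h : x ∈ l.dropWhile p) : x ∈ l :=
  (List.dropWhile_sublist p (l := l)).subset h

lemma key (k : Int) : ∀ (rest : List String) (idx : Int) (hq tq : List Int) (m : Int),
    (hq = [] ∨ tq = []) →
    (∀ x ∈ hq, x < idx) → (∀ x ∈ tq, x < idx) →
    loopB k rest idx hq tq m = loopA k (hq ++ gH rest idx) (tq ++ gT rest idx) m := by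
  intro rest
  induction rest with
  | nil =>
    intro idx hq tq m hemp _ _
    rcases hemp with h | h <;> subst h
    · cases tq <;> simp [loopB, gH, gT, loopA]
    · cases hq <;> simp [loopB, gH, gT, loopA]
  | cons v rest ih =>
    intro idx hq tq m hemp hhq htq
    have hstep : ∀ x : Int, x < idx → x < idx + 1 := by omega
    by_cases h1 : v = "H"
    · -- an 'H' at position idx
      simp only [loopB, gH, gT, if_pos h1]
      rcases hdq : tq.dropWhile (fun t => idx - t > k) with _ | ⟨t, ts⟩
      · -- queue of treasures fully purged (or empty): append idx to hq
        have hall : ∀ d ∈ tq, d < idx ∧ idx - d > k := by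
          intro d hd
          have htk : tq.takeWhile (fun t => idx - t > k) = tq := by
            have := List.takeWhile_append_dropWhile (p := fun t => idx - t > k) (l := tq)
            rw [hdq] at this; simpa using this
          refine ⟨htq d hd, ?_⟩
          have hpd := List.mem_takeWhile_imp (p := fun t => decide (idx - t > k)) (l := tq)
            (by rw [htk]; exact hd)
          simpa using hpd
        dsimp only
        rw [ih (idx + 1) (hq ++ [idx]) [] m (Or.inr rfl)
              (by intro x hx; rcases List.mem_append.1 hx with h | h
                  · exact hstep x (hhq x h)
                  · simp at h; omega)
              (by simp)]
        rcases hemp with h | h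
        · subst h; simp [purgeT k idx (gH rest (idx+1)) tq (gT rest (idx+1)) m hall]
        · subst h; simp
      · -- front treasure t matches
        have hqe : hq = [] := by
          rcases hemp with h | h
          · exact h
          · subst h; simp at hdq
        subst hqe
        have hsplit : tq = tq.takeWhile (fun t => idx - t > k) ++ t :: ts := by
          have := List.takeWhile_append_dropWhile (p := fun t => idx - t > k) (l := tq)
          rw [hdq] at this; exact this.symm
        have hallp : ∀ d ∈ tq.takeWhile (fun t => idx - t > k), d < idx ∧ idx - d > k := by
          intro d hd
          refine ⟨htq d (by rw [hsplit]; exact List.mem_append.2 (Or.inl hd)), ?_⟩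
          have hpd := List.mem_takeWhile_imp (p := fun t => decide (idx - t > k)) (l := tq) hd
          simpa using hpd
        have ht_mem : t ∈ tq := by rw [hsplit]; simp
        have ht_lt : t < idx := htq t ht_mem
        have ht_near : ¬ idx - t > k := by
          have := dropWhile_head_not tq hdq
          simpa using this
        have habs : |idx - t| ≤ k := by rw [abs_of_pos (by omega)]; omega
        dsimp only
        rw [ih (idx + 1) [] ts (m + 1) (Or.inl rfl) (by simp)
              (by intro x hx
                  exact hstep x (htq x (mem_dropWhile_of_mem (by rw [hdq]; simp [hx]))))]
        rw [hsplit]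
        simp only [List.nil_append, List.append_assoc, List.cons_append]
        rw [purgeT k idx (gH rest (idx+1)) _ _ m hallp]
        simp [loopA, habs]
    · by_cases h2 : v = "T"
      · -- a 'T' at position idx (mirror)
        simp only [loopB, gH, gT, if_neg h1, if_pos h2]
        rcases hdq : hq.dropWhile (fun h => idx - h > k) with _ | ⟨h, hs⟩
        · have hall : ∀ d ∈ hq, d < idx ∧ idx - d > k := by
            intro d hd
            have htk : hq.takeWhile (fun h => idx - h > k) = hq := by
              have := List.takeWhile_append_dropWhile (p := fun h => idx - h > k) (l := hq)
              rw [hdq] at this; simpa using this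
            refine ⟨hhq d hd, ?_⟩
            have hpd := List.mem_takeWhile_imp (p := fun h => decide (idx - h > k)) (l := hq)
              (by rw [htk]; exact hd)
            simpa using hpd
          dsimp only
          rw [ih (idx + 1) [] (tq ++ [idx]) m (Or.inl rfl) (by simp)
                (by intro x hx; rcases List.mem_append.1 hx with h | h
                    · exact hstep x (htq x h)
                    · simp at h; omega)]
          rcases hemp with h | h
          · subst h; simp
          · subst h; simp [purgeH k idx (gT rest (idx+1)) hq (gH rest (idx+1)) m hall]
        · have hte : tq = [] := by
            rcases hemp with h | h
            · subst h; simp at hdq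
            · exact h
          subst hte
          have hsplit : hq = hq.takeWhile (fun h => idx - h > k) ++ h :: hs := by
            have := List.takeWhile_append_dropWhile (p := fun h => idx - h > k) (l := hq)
            rw [hdq] at this; exact this.symm
          have hallp : ∀ d ∈ hq.takeWhile (fun h => idx - h > k), d < idx ∧ idx - d > k := by
            intro d hd
            refine ⟨hhq d (by rw [hsplit]; exact List.mem_append.2 (Or.inl hd)), ?_⟩
            have hpd := List.mem_takeWhile_imp (p := fun h => decide (idx - h > k)) (l := hq) hd
            simpa using hpd
          have hh_mem : h ∈ hq := by rw [hsplit]; simp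
          have hh_lt : h < idx := hhq h hh_mem
          have hh_near : ¬ idx - h > k := by
            have := dropWhile_head_not hq hdq
            simpa using this
          have habs : |h - idx| ≤ k := by rw [abs_of_neg (by omega)]; omega
          dsimp only
          rw [ih (idx + 1) hs [] (m + 1) (Or.inr rfl)
                (by intro x hx
                    exact hstep x (hhq x (mem_dropWhile_of_mem (by rw [hdq]; simp [hx]))))
                (by simp)]
          rw [hsplit]
          simp only [List.nil_append, List.append_assoc, List.cons_append]
          rw [purgeH k idx (gT rest (idx+1)) _ _ m hallp]
          simp [loopA, habs]
      · simp only [loopB, gH, gT, if_neg h1, if_neg h2]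
        exact ih (idx + 1) hq tq m hemp (fun x hx => hstep x (hhq x hx)) (fun x hx => hstep x (htq x hx))

-- ===== VERDICT (by name: the statement is the Claim_ definition above) =====
theorem hunt_treasure_spec : Claim_equal_hunt_treasure := by
  intro arr n k _
  unfold Spec_hunt_treasure hunt_treasure hunt_treasure_alt
  rw [gatherA_eq, key k arr 0 [] [] 0 (Or.inl rfl) (by simp) (by simp)]
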